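-- pv_equiv track=rewrite | github.com/elevin01/Summer-Research | similarity.py | contains_antonyms
-- ===== SOURCE A (Python) =====
-- ANTONYM_PAIRS = {
--     "balanced": ["unbalanced"],
--     "with": ["without"],
--     "positive": ["negative"],
--     "active": ["inactive"],
--     "regular": ["irregular"],
--     "normal": ["abnormal"],
-- }
--
-- def contains_antonyms(words1, words2):
--     for word1 in words1:
--         if word1 in ANTONYM_PAIRS:
--             for antonym in ANTONYM_PAIRS[word1]:
--                 if antonym in words2:
--                     return True
--     # check the reverse as well
--     for word2 in words2:
--         if word2 in ANTONYM_PAIRS: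
--             for antonym in ANTONYM_PAIRS[word2]:
--                 if antonym in words1:
--                     return True
--     return False
-- ===== SOURCE B (Python) =====
-- ANTONYM_PAIRS = {
--     "balanced": ["unbalanced"],
--     "with": ["without"],
--     "positive": ["negative"],
--     "active": ["inactive"],
--     "regular": ["irregular"],
--     "normal": ["abnormal"],
-- }
--
-- def contains_antonyms(words1, words2):
--     for key, antonyms in ANTONYM_PAIRS.items():
--         for antonym in antonyms:
--             if (key in words1 and antonym in words2) or (key in words2 and antonym in words1):
--                 return True
--     return False
-- ===== Notes on version B (the rewrite author's own statement) =====
-- stated objective: simpler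
-- what changed: B iterates the fixed ANTONYM_PAIRS table once, testing both symmetric membership directions per (key, antonym) entry, instead of A's two separate scans over the input word lists with dict lookups.
import Mathlib
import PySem

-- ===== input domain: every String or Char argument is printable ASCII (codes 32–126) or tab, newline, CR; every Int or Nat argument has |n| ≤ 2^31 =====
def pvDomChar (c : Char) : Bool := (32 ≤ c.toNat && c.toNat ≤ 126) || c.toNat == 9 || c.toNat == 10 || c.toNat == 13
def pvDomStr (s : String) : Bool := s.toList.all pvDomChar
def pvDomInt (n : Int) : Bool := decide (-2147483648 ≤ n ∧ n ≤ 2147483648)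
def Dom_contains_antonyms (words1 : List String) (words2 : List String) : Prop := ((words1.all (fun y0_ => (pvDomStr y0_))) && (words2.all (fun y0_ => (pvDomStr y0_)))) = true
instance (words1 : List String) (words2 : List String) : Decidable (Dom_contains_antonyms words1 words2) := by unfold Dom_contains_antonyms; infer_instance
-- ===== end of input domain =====

-- B iterates the fixed antonym table, checking both symmetric directions per pair, instead of
-- scanning the two input word lists; same return value everywhere (objective: simpler).

-- ===== PORT A =====
def ANTONYM_PAIRS : PySem.Dict String (List String) :=
  PySem.Dict.mk [("balanced", ["unbalanced"]), ("with", ["without"]), ("positive", ["negative"]),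
    ("active", ["inactive"]), ("regular", ["irregular"]), ("normal", ["abnormal"])]

def contains_antonyms (words1 : List String) (words2 : List String) : Bool :=
  -- first loop over words1; early 'return True' becomes the '||' with the second loop
  if words1.any (fun word1 =>
      if ANTONYM_PAIRS.contains word1 then
        ((ANTONYM_PAIRS.get? word1).getD []).any (fun antonym => words2.contains antonym)
      else false)
  then true
  else if words2.any (fun word2 =>
      if ANTONYM_PAIRS.contains word2 then
        ((ANTONYM_PAIRS.get? word2).getD []).any (fun antonym => words1.contains antonym)
      else false)
  then true
  else false

-- ===== PORT B =====
def contains_antonyms_alt (words1 : List String) (words2 : List String) : Bool :=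
  ANTONYM_PAIRS.items.any (fun kv =>
    kv.2.any (fun antonym =>
      (words1.contains kv.1 && words2.contains antonym) ||
      (words2.contains kv.1 && words1.contains antonym)))

-- ===== PRECONDITION & SPEC =====
def Spec_contains_antonyms (words1 : List String) (words2 : List String) (out : Bool) : Prop := out = contains_antonyms_alt words1 words2
instance (words1 : List String) (words2 : List String) (out : Bool) : Decidable (Spec_contains_antonyms words1 words2 out) := by unfold Spec_contains_antonyms; infer_instance

-- ===== CLAIM (what is proved, stated in full; the proofs are below) =====
def Claim_equal_contains_antonyms : Prop := ∀ (words1 : List String) (words2 : List String), Dom_contains_antonyms words1 words2 → Spec_contains_antonyms words1 words2 (contains_antonyms words1 words2)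

-- ===== LEMMAS AND PROOFS =====

-- A's per-word test (key lookup then antonym scan) as a fixed 6-term disjunction.
lemma felem_eq (w : String) (other : List String) :
    (if ANTONYM_PAIRS.contains w then
        ((ANTONYM_PAIRS.get? w).getD []).any (fun antonym => other.contains antonym)
      else false)
    = (("balanced" == w) && other.contains "unbalanced" ||
       ("with" == w) && other.contains "without" ||
       ("positive" == w) && other.contains "negative" ||
       ("active" == w) && other.contains "inactive" ||
       ("regular" == w) && other.contains "irregular" ||
       ("normal" == w) && other.contains "abnormal") := by
  by_cases h1 : w = "balanced"
  · subst h1; simp [ANTONYM_PAIRS, PySem.Dict.contains, PySem.Dict.get?]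
  by_cases h2 : w = "with"
  · subst h2; simp [ANTONYM_PAIRS, PySem.Dict.contains, PySem.Dict.get?]
  by_cases h3 : w = "positive"
  · subst h3; simp [ANTONYM_PAIRS, PySem.Dict.contains, PySem.Dict.get?]
  by_cases h4 : w = "active"
  · subst h4; simp [ANTONYM_PAIRS, PySem.Dict.contains, PySem.Dict.get?]
  by_cases h5 : w = "regular"
  · subst h5; simp [ANTONYM_PAIRS, PySem.Dict.contains, PySem.Dict.get?]
  by_cases h6 : w = "normal"
  · subst h6; simp [ANTONYM_PAIRS, PySem.Dict.contains, PySem.Dict.get?]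
  · simp [ANTONYM_PAIRS, PySem.Dict.contains, beq_iff_eq,
      Ne.symm h1, Ne.symm h2, Ne.symm h3, Ne.symm h4, Ne.symm h5, Ne.symm h6]

-- distributing the head element's tests over the tail's disjunction (abstract Booleans)
lemma or_and_distrib6 (b1 b2 b3 b4 b5 b6 c1 c2 c3 c4 c5 c6 m1 m2 m3 m4 m5 m6 : Bool) :
    ((b1 && m1 || b2 && m2 || b3 && m3 || b4 && m4 || b5 && m5 || b6 && m6) ||
     (c1 && m1 || c2 && m2 || c3 && m3 || c4 && m4 || c5 && m5 || c6 && m6))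
    = ((b1 || c1) && m1 || (b2 || c2) && m2 || (b3 || c3) && m3 ||
       (b4 || c4) && m4 || (b5 || c5) && m5 || (b6 || c6) && m6) := by
  cases m1 <;> cases m2 <;> cases m3 <;> cases m4 <;> cases m5 <;> cases m6 <;>
    simp [Bool.or_comm, Bool.or_left_comm]

-- A's scan over a word list equals the fixed 6-term disjunction over the table.
lemma loopA_eq (ws other : List String) :
    (ws.any (fun w =>
      if ANTONYM_PAIRS.contains w then
        ((ANTONYM_PAIRS.get? w).getD []).any (fun antonym => other.contains antonym)
      else false))
    = ((ws.contains "balanced" && other.contains "unbalanced") ||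
       (ws.contains "with" && other.contains "without") ||
       (ws.contains "positive" && other.contains "negative") ||
       (ws.contains "active" && other.contains "inactive") ||
       (ws.contains "regular" && other.contains "irregular") ||
       (ws.contains "normal" && other.contains "abnormal")) := by
  induction ws with
  | nil => simp
  | cons w ws ih =>
    rw [List.any_cons, felem_eq, ih]
    simp only [List.contains_cons]
    exact or_and_distrib6 _ _ _ _ _ _ _ _ _ _ _ _ _ _ _ _ _ _

lemma interleave12 (a b c d e f g h i j k l : Bool) :
    ((a || b || c || d || e || f) || (g || h || i || j || k || l))
    = ((a || g) || (b || h) || (c || i) || (d || j) || (e || k) || (f || l)) := by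
  cases a <;> cases b <;> cases c <;> cases d <;> cases e <;> cases f <;>
    cases g <;> cases h <;> cases i <;> cases j <;> cases k <;> cases l <;> rfl

-- ===== VERDICT (by name: the statement is the Claim_ definition above) =====
theorem contains_antonyms_spec : Claim_equal_contains_antonyms := by
  intro words1 words2 _
  show contains_antonyms words1 words2 = contains_antonyms_alt words1 words2
  unfold contains_antonyms contains_antonyms_alt
  rw [loopA_eq, loopA_eq]
  simp only [ANTONYM_PAIRS, List.any_cons, List.any_nil, Bool.or_false]
  rw [show ∀ (x y : Bool), (if x then true else if y then true else false) = (x || y) from by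
    intro x y; cases x <;> cases y <;> rfl]
  rw [interleave12]
  simp only [Bool.or_assoc]
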